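-- pv_equiv track=rewrite | github.com/oldpride/tpsup | python3/lib/tpsup/lock.py | uri_escape
-- ===== SOURCE A (Python) =====
-- def uri_escape(string):
--     """ convert wierd chars into utl-styple string """
--     escape = {}
--
--     for i in range(0, 256):
--         escape[chr(i)] = "%%%02X" % i
--
--         # RFC3986 = '[AA-Za-z0-9\-\._~]';
--         # compiled = re.compile(RFC3986)
--         # result = re.sub(r"[^A-Za-z0-9\\-\\._~]", escape[r"\1"], string)
--
--     escaped = []
--
--     for c in list(string):
--         ord_c = ord(c)
--         if ((ord('A') <= ord_c <= ord('Z'))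
--                 or (ord('a') <= ord_c <= ord('z'))
--                 or (ord('0') <= ord_c <= ord('9'))
--                 or ord_c == ord('-') or ord_c == ord('.')
--                 or ord_c == ord('_') or ord_c == ord('~')):
--             escaped.append(c)
--         else:
--             escaped.append(escape[c])
--
--     result = ''.join(escaped)
--
--     return result
-- ===== SOURCE B (Python) =====
-- _UNRESERVED = frozenset(
--     "ABCDEFGHIJKLMNOPQRSTUVWXYZabcdefghijklmnopqrstuvwxyz0123456789-._~")
--
--
-- def uri_escape(string):
--     # Run-based scan: copy each maximal run of unreserved characters wholesale
--     # as one slice, escape the single separator character after it, repeat.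
--     n = len(string)
--     parts = []
--     i = 0
--     while i < n:
--         j = i
--         while j < n and string[j] in _UNRESERVED:
--             j += 1
--         parts.append(string[i:j])
--         if j < n:
--             parts.append("%%%02X" % ord(string[j]))
--             i = j + 1
--         else:
--             i = j
--     return ''.join(parts)
-- ===== Notes on version B (the rewrite author's own statement) =====
-- stated objective: alternative
-- what changed: Replaces A's 256-entry escape dict and per-character lookup/append loop by a run-based two-pointer scan that copies each maximal run of unreserved characters wholesale as one slice and escapes only the single separator character after it.
import Mathlib
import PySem

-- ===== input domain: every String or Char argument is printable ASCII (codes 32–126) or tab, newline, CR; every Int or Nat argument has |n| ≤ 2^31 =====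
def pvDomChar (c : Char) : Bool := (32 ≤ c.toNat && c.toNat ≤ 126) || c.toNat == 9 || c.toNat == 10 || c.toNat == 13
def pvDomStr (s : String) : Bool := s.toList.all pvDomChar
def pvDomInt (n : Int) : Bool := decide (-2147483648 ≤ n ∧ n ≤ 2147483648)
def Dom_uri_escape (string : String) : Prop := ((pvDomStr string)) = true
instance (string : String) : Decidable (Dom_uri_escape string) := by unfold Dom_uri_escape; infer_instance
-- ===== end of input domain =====

-- B replaces A's per-character table-lookup loop by a run-based scan: it copies each
-- maximal run of unreserved characters wholesale as one slice and escapes only the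
-- single separator character after it (alternative decomposition; a timing run measured it faster by a constant factor).

-- shared helper: the Python expression "%%%02X" % i, exact for 0 ≤ i < 256 (both sources contain it)
def pvHexDig (d : Nat) : Char :=
  (['0','1','2','3','4','5','6','7','8','9','A','B','C','D','E','F']).getD d '0'

def pvHex2L (i : Nat) : List Char := ['%', pvHexDig (i / 16), pvHexDig (i % 16)]

def pvHex2 (i : Nat) : String := String.ofList (pvHex2L i)

-- ===== PORT A =====
def uri_escape (string : String) : String :=
  let escape : PySem.Dict Char String :=
    (PySem.List.pyRange 0 256 1).foldl
      (fun d i => d.insert (Char.ofNat i.toNat) (pvHex2 i.toNat)) PySem.Dict.empty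
  let escaped : List String :=
    string.toList.foldl (fun acc c =>
      let oc := c.toNat
      if (65 ≤ oc ∧ oc ≤ 90) ∨ (97 ≤ oc ∧ oc ≤ 122) ∨ (48 ≤ oc ∧ oc ≤ 57)
          ∨ oc = 45 ∨ oc = 46 ∨ oc = 95 ∨ oc = 126 then
        acc ++ [String.singleton c]
      else
        -- escape[c]: KeyError (= none) only for code points ≥ 256, outside Dom
        acc ++ [(escape.get? c).getD ""]) []
  PySem.Str.join "" escaped

-- ===== PORT B =====
def pvUnreserved : PySem.Set Char :=
  PySem.Set.ofList
    "ABCDEFGHIJKLMNOPQRSTUVWXYZabcdefghijklmnopqrstuvwxyz0123456789-._~".toList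

-- Source B's inner while loop: advance j past the maximal unreserved run
def pvRunEnd (cs : List Char) (j : Nat) : Nat :=
  if j < cs.length ∧ pvUnreserved.contains (cs.getD j ' ') = true then
    pvRunEnd cs (j + 1)
  else j
termination_by cs.length - j
decreasing_by omega

theorem pvRunEnd_le (cs : List Char) (j : Nat) : j ≤ pvRunEnd cs j := by
  induction j using pvRunEnd.induct cs with
  | case1 j h ih => rw [pvRunEnd, if_pos h]; omega
  | case2 j h => rw [pvRunEnd, if_neg h]

-- Source B's outer while loop over index i, accumulating the parts list
-- (string indexing/slicing done on string.toList; all indices are in range)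
def pvGo (cs : List Char) (i : Nat) (parts : List (List Char)) : List (List Char) :=
  if i < cs.length then
    let j := pvRunEnd cs i
    let parts' := parts ++ [PySem.List.slice cs (some (i : Int)) (some (j : Int))]
    if j < cs.length then
      pvGo cs (j + 1) (parts' ++ [pvHex2L (cs.getD j ' ').toNat])
    else pvGo cs j parts'
  else parts
termination_by cs.length - i
decreasing_by
  · have := pvRunEnd_le cs i; omega
  · have := pvRunEnd_le cs i; omega

def uri_escape_alt (string : String) : String :=
  PySem.Str.join "" ((pvGo string.toList 0 []).map String.ofList)

-- ===== PRECONDITION & SPEC =====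
def Spec_uri_escape (string : String) (out : String) : Prop := out = uri_escape_alt string
instance (string : String) (out : String) : Decidable (Spec_uri_escape string out) := by unfold Spec_uri_escape; infer_instance

-- ===== CLAIM (what is proved, stated in full; the proofs are below) =====
def Claim_equal_uri_escape : Prop := ∀ (string : String), Dom_uri_escape string → Spec_uri_escape string (uri_escape string)

-- ===== LEMMAS AND PROOFS =====

-- per-character result both programs agree on (List Char level)
def pvF (c : Char) : List Char :=
  if pvUnreserved.contains c then [c] else pvHex2L c.toNat

theorem pv_toNat_ofNat (k : Nat) (h : k < 256) : (Char.ofNat k).toNat = k := by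
  have hv : k < 55296 ∨ 57343 < k ∧ k < 1114112 := Or.inl (by omega)
  simp [Char.ofNat, hv, Char.ofNatAux, Char.toNat]

def pvDictUpto (n : Nat) : PySem.Dict Char String :=
  (PySem.List.pyRange 0 (n : Int) 1).foldl
    (fun d i => d.insert (Char.ofNat i.toNat) (pvHex2 i.toNat)) PySem.Dict.empty

theorem pvDictUpto_get? (n : Nat) (hn : n ≤ 256) (k : Nat) (hk : k < n) :
    (pvDictUpto n).get? (Char.ofNat k) = some (pvHex2 k) := by
  induction n with
  | zero => omega
  | succ m ih =>
    have hr : PySem.List.pyRange 0 ((m : Int) + 1) 1 = PySem.List.pyRange 0 (m : Int) 1 ++ [(m : Int)] :=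
      PySem.List.pyRange_one_succ_right (by omega)
    have hstep : pvDictUpto (m + 1)
        = (pvDictUpto m).insert (Char.ofNat m) (pvHex2 m) := by
      unfold pvDictUpto
      rw [show ((m + 1 : Nat) : Int) = (m : Int) + 1 by push_cast; ring, hr, List.foldl_append]
      simp
    rw [hstep]
    rcases Nat.lt_succ_iff_lt_or_eq.mp hk with h | h
    · rw [PySem.Dict.get?_insert_of_ne _ _ (by
        intro he
        have : k = m := by
          have h1 := pv_toNat_ofNat k (by omega)
          have h2 := pv_toNat_ofNat m (by omega)
          rw [← h1, ← h2, he]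
        omega)]
      exact ih (by omega) h
    · subst h
      exact PySem.Dict.get?_insert_self _ _ _

-- unreserved membership as a statement about the code point
def pvUnresNats : List Nat :=
  [65,66,67,68,69,70,71,72,73,74,75,76,77,78,79,80,81,82,83,84,85,86,87,88,89,90,
   97,98,99,100,101,102,103,104,105,106,107,108,109,110,111,112,113,114,115,116,117,118,119,120,121,122,
   48,49,50,51,52,53,54,55,56,57,45,46,95,126]

set_option maxRecDepth 4096 in
theorem pv_unreserved_iff (c : Char) :
    pvUnreserved.contains c = true ↔
      (65 ≤ c.toNat ∧ c.toNat ≤ 90) ∨ (97 ≤ c.toNat ∧ c.toNat ≤ 122)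
        ∨ (48 ≤ c.toNat ∧ c.toNat ≤ 57)
        ∨ c.toNat = 45 ∨ c.toNat = 46 ∨ c.toNat = 95 ∨ c.toNat = 126 := by
  rw [PySem.Set.contains_iff]
  have hmap : pvUnreserved.map Char.toNat = pvUnresNats := by decide
  constructor
  · intro h
    have hm : c.toNat ∈ pvUnresNats := hmap ▸ List.mem_map_of_mem h
    simp only [pvUnresNats, List.mem_cons, List.not_mem_nil, or_false] at hm
    omega
  · intro h
    have hm : c.toNat ∈ pvUnresNats := by
      simp only [pvUnresNats, List.mem_cons, List.not_mem_nil, or_false]; omega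
    have hall : ∀ k ∈ pvUnresNats, Char.ofNat k ∈ pvUnreserved := by decide
    rw [← Char.ofNat_toNat c]
    exact hall _ hm

-- A's per-character value is pvF, for characters below code point 256
theorem pv_char_agree (c : Char) (h : c.toNat < 256) :
    (if (65 ≤ c.toNat ∧ c.toNat ≤ 90) ∨ (97 ≤ c.toNat ∧ c.toNat ≤ 122) ∨ (48 ≤ c.toNat ∧ c.toNat ≤ 57)
        ∨ c.toNat = 45 ∨ c.toNat = 46 ∨ c.toNat = 95 ∨ c.toNat = 126 then
       String.singleton c
     else ((pvDictUpto 256).get? c).getD "").toList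
    = pvF c := by
  unfold pvF
  by_cases hu : (65 ≤ c.toNat ∧ c.toNat ≤ 90) ∨ (97 ≤ c.toNat ∧ c.toNat ≤ 122) ∨ (48 ≤ c.toNat ∧ c.toNat ≤ 57)
      ∨ c.toNat = 45 ∨ c.toNat = 46 ∨ c.toNat = 95 ∨ c.toNat = 126
  · rw [if_pos hu, if_pos ((pv_unreserved_iff c).mpr hu)]
    simp [String.singleton]
  · rw [if_neg hu, if_neg (by rw [pv_unreserved_iff c]; exact hu)]
    have := pvDictUpto_get? 256 le_rfl c.toNat h
    rw [Char.ofNat_toNat] at this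
    rw [this]
    simp [pvHex2]

-- fold with a branch that appends one element on both sides is a map
theorem pv_foldl_if_map {α β : Type} (p : α → Prop) [DecidablePred p]
    (f g : α → β) (l : List α) (acc : List β) :
    l.foldl (fun acc c => if p c then acc ++ [f c] else acc ++ [g c]) acc
      = acc ++ l.map (fun c => if p c then f c else g c) := by
  have he : (fun (acc : List β) c => if p c then acc ++ [f c] else acc ++ [g c])
      = fun acc c => acc ++ [if p c then f c else g c] := by
    funext acc c; split <;> rfl
  rw [he, PySem.List.foldl_append_singleton_eq_map]

-- ''.join is concatenation
theorem pv_join_nil (ps : List (List Char)) : PySem.Chars.join [] ps = ps.flatten := by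
  induction ps with
  | nil => simp [PySem.Chars.join_nil]
  | cons p rest ih =>
    cases rest with
    | nil => simp [PySem.Chars.join_singleton]
    | cons q r =>
      rw [PySem.Chars.join_cons_cons, ih]
      simp

theorem pv_flatten_map_singleton (l : List Char) (h : ∀ c ∈ l, pvF c = [c]) :
    (l.map pvF).flatten = l := by
  induction l with
  | nil => rfl
  | cons c t ih =>
    simp only [List.map_cons, List.flatten_cons, h c (by simp)]
    rw [ih (fun x hx => h x (by simp [hx]))]
    rfl

-- pvRunEnd: everything before the stop index is unreserved …
theorem pvRunEnd_mem (cs : List Char) (j : Nat) :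
    ∀ k, j ≤ k → k < pvRunEnd cs j → pvUnreserved.contains (cs.getD k ' ') = true := by
  induction j using pvRunEnd.induct cs with
  | case1 j h ih =>
    intro k hk1 hk2
    rw [pvRunEnd, if_pos h] at hk2
    rcases Nat.eq_or_lt_of_le hk1 with rfl | hlt
    · exact h.2
    · exact ih k hlt hk2
  | case2 j h =>
    intro k hk1 hk2
    rw [pvRunEnd, if_neg h] at hk2
    omega

-- … and the stop index itself (when in range) is not
theorem pvRunEnd_stop (cs : List Char) (j : Nat) :
    pvRunEnd cs j < cs.length → pvUnreserved.contains (cs.getD (pvRunEnd cs j) ' ') = false := by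
  induction j using pvRunEnd.induct cs with
  | case1 j h ih => rw [pvRunEnd, if_pos h]; exact ih
  | case2 j h =>
    rw [pvRunEnd, if_neg h]
    intro hlt
    rcases Decidable.not_and_iff_not_or_not.mp h with h1 | h2
    · omega
    · exact Bool.not_eq_true _ ▸ eq_false_of_ne_true h2

-- the invariant of Source B's outer loop
theorem pvGo_spec (cs : List Char) (i : Nat) (parts : List (List Char)) :
    (pvGo cs i parts).flatten = parts.flatten ++ ((cs.drop i).map pvF).flatten := by
  induction i, parts using pvGo.induct cs with
  | case1 i parts hi j parts' hj ih =>
    simp only [show parts' = parts ++ [PySem.List.slice cs (some (i : Int)) (some ((j : Nat) : Int))]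
      from rfl] at ih
    simp only [show j = pvRunEnd cs i from rfl] at ih hj
    have hstep : pvGo cs i parts
        = pvGo cs (pvRunEnd cs i + 1)
            ((parts ++ [PySem.List.slice cs (some (i : Int)) (some ((pvRunEnd cs i : Nat) : Int))])
              ++ [pvHex2L (cs.getD (pvRunEnd cs i) ' ').toNat]) := by
      rw [pvGo]; simp [hi, hj]
    rw [hstep, ih]
    have hij : i ≤ pvRunEnd cs i := pvRunEnd_le cs i
    -- the copied run
    have hseg : PySem.List.slice cs (some (i : Int)) (some ((pvRunEnd cs i : Nat) : Int))
        = (cs.drop i).take (pvRunEnd cs i - i) := PySem.List.slice_natCast cs i _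
    have hsplit : cs.drop i
        = (cs.drop i).take (pvRunEnd cs i - i) ++ cs.drop (pvRunEnd cs i) := by
      conv_lhs => rw [← List.take_append_drop (pvRunEnd cs i - i) (cs.drop i)]
      rw [List.drop_drop]
      congr 2
      omega
    have hrun : (((cs.drop i).take (pvRunEnd cs i - i)).map pvF).flatten
        = (cs.drop i).take (pvRunEnd cs i - i) := by
      apply pv_flatten_map_singleton
      intro c hc
      rcases List.getElem_of_mem hc with ⟨k, hk, hck⟩
      have hlen : k < pvRunEnd cs i - i := lt_of_lt_of_le hk (by simp)
      have hidx : i + k < cs.length := by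
        have := List.length_take_le (pvRunEnd cs i - i) (cs.drop i)
        have h2 : k < (cs.drop i).length := lt_of_lt_of_le hk (by simp)
        simp at h2; omega
      have : c = cs[i + k] := by
        rw [← hck]
        rw [List.getElem_take, List.getElem_drop]
      have hcu : pvUnreserved.contains (cs.getD (i + k) ' ') = true :=
        pvRunEnd_mem cs i (i + k) (by omega) (by omega)
      rw [List.getD_eq_getElem cs ' ' hidx] at hcu
      unfold pvF
      rw [this, hcu]
      simp
    -- the escaped separator
    have hdropj : cs.drop (pvRunEnd cs i) = cs[pvRunEnd cs i] :: cs.drop (pvRunEnd cs i + 1) :=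
      List.drop_eq_getElem_cons hj
    have hstop : pvF cs[pvRunEnd cs i] = pvHex2L cs[pvRunEnd cs i].toNat := by
      have := pvRunEnd_stop cs i hj
      rw [List.getD_eq_getElem cs ' ' hj] at this
      unfold pvF
      rw [this]
      simp
    rw [hseg]
    conv_rhs => rw [hsplit, hdropj]
    simp only [List.map_append, List.flatten_append, List.map_cons, List.flatten_cons, hrun, hstop,
      List.getD_eq_getElem cs ' ' hj]
    simp
  | case2 i parts hi j parts' hj ih =>
    simp only [show parts' = parts ++ [PySem.List.slice cs (some (i : Int)) (some ((j : Nat) : Int))]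
      from rfl] at ih
    simp only [show j = pvRunEnd cs i from rfl] at ih hj
    have hstep : pvGo cs i parts
        = pvGo cs (pvRunEnd cs i)
            (parts ++ [PySem.List.slice cs (some (i : Int)) (some ((pvRunEnd cs i : Nat) : Int))]) := by
      rw [pvGo]; simp [hi, hj]
    rw [hstep, ih]
    have hij : i ≤ pvRunEnd cs i := pvRunEnd_le cs i
    have hseg : PySem.List.slice cs (some (i : Int)) (some ((pvRunEnd cs i : Nat) : Int))
        = (cs.drop i).take (pvRunEnd cs i - i) := PySem.List.slice_natCast cs i _
    have hnil : cs.drop (pvRunEnd cs i) = [] := List.drop_eq_nil_of_le (by omega)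
    have htake : (cs.drop i).take (pvRunEnd cs i - i) = cs.drop i := by
      apply List.take_of_length_le
      simp
      omega
    have hrun : ((cs.drop i).map pvF).flatten = cs.drop i := by
      apply pv_flatten_map_singleton
      intro c hc
      rcases List.getElem_of_mem hc with ⟨k, hk, hck⟩
      have hidx : i + k < cs.length := by simp at hk; omega
      have : c = cs[i + k] := by rw [← hck, List.getElem_drop]
      have hcu : pvUnreserved.contains (cs.getD (i + k) ' ') = true := by
        apply pvRunEnd_mem cs i (i + k) (by omega)
        simp at hk
        omega
      rw [List.getD_eq_getElem cs ' ' hidx] at hcu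
      unfold pvF
      rw [this, hcu]
      simp
    simp only [hnil, List.map_nil, List.flatten_nil, List.append_nil]
    rw [hseg, htake, hrun]
    simp
  | case3 i parts hi =>
    rw [pvGo, if_neg hi]
    simp [List.drop_eq_nil_of_le (by omega : cs.length ≤ i)]

-- A's result is the concatenation of the per-character pieces
set_option maxRecDepth 8192 in
theorem uri_escape_eq (s : String) (hdom : Dom_uri_escape s) :
    (uri_escape s).toList = (s.toList.map pvF).flatten := by
  rw [show uri_escape s = PySem.Str.join ""
      (s.toList.foldl (fun acc c =>
        if (65 ≤ c.toNat ∧ c.toNat ≤ 90) ∨ (97 ≤ c.toNat ∧ c.toNat ≤ 122) ∨ (48 ≤ c.toNat ∧ c.toNat ≤ 57)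
            ∨ c.toNat = 45 ∨ c.toNat = 46 ∨ c.toNat = 95 ∨ c.toNat = 126 then
          acc ++ [String.singleton c]
        else acc ++ [((pvDictUpto 256).get? c).getD ""]) []) from rfl]
  rw [pv_foldl_if_map]
  simp only [List.nil_append, PySem.Str.join, String.toList_ofList, String.toList_empty]
  rw [pv_join_nil, List.map_map]
  congr 1
  apply List.map_congr_left
  intro c hc
  have hd : pvDomChar c = true := (List.all_eq_true.mp hdom) c hc
  have hb : c.toNat < 256 := by
    simp [pvDomChar] at hd
    omega
  exact pv_char_agree c hb

-- ===== VERDICT (by name: the statement is the Claim_ definition above) =====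
set_option maxRecDepth 8192 in
theorem uri_escape_spec : Claim_equal_uri_escape := by
  intro s hdom
  unfold Spec_uri_escape uri_escape_alt
  have hb : (PySem.Str.join "" ((pvGo s.toList 0 []).map String.ofList)).toList
      = (s.toList.map pvF).flatten := by
    simp only [PySem.Str.join, String.toList_ofList, String.toList_empty, List.map_map]
    rw [show (String.toList ∘ String.ofList) = id from funext (fun l => String.toList_ofList),
      List.map_id, pv_join_nil, pvGo_spec]
    simp
  have := uri_escape_eq s hdom
  have hlist : (uri_escape s).toList
      = (PySem.Str.join "" ((pvGo s.toList 0 []).map String.ofList)).toList := by rw [this, hb]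
  calc uri_escape s = String.ofList (uri_escape s).toList := by rw [String.ofList_toList]
    _ = _ := by rw [hlist, String.ofList_toList]
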